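-- pv_equiv track=rewrite | github.com/Sharvesh93/Assembly-Aware-Text-Editor | asm_editor_fixed/src/instruction_ref.py | _word_at
-- ===== SOURCE A (Python) =====
-- def _word_at(line, col):
--     if not line:
--         return None
--     if col >= len(line):
--         col = len(line) - 1
--     if col < 0:
--         return None
--     i = col
--     while i > 0 and (line[i - 1].isalnum() or line[i - 1] in "@_?"):
--         i -= 1
--     j = col
--     while j < len(line) and (line[j].isalnum() or line[j] in "@_?"):
--         j += 1
--     w = line[i:j]
--     return w if w else None
-- ===== SOURCE B (Python) =====
-- def _word_at(line, col):
--     if not line: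
--         return None
--     n = len(line)
--     if col >= n:
--         col = n - 1
--     if col < 0:
--         return None
--     # one forward pass: collect maximal runs of word characters as (start, end) spans
--     spans = []
--     start = None
--     for idx, ch in enumerate(line):
--         if ch.isalnum() or ch in "@_?":
--             if start is None:
--                 start = idx
--         else:
--             if start is not None:
--                 spans.append((start, idx))
--                 start = None
--     if start is not None:
--         spans.append((start, n))
--     # the word at col is the unique span touching col (inclusive right edge)
--     for s, e in spans:
--         if s <= col <= e:
--             return line[s:e]
--     return None
-- ===== Notes on version B (the rewrite author's own statement) =====
-- stated objective: alternative
-- what changed: Replaces A's two while-loops that expand left/right from the cursor with a single forward scan that collects all maximal word-character runs as (start,end) spans and then picks the unique span whose inclusive range [start,end] contains the (clamped) column.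
import Mathlib
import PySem

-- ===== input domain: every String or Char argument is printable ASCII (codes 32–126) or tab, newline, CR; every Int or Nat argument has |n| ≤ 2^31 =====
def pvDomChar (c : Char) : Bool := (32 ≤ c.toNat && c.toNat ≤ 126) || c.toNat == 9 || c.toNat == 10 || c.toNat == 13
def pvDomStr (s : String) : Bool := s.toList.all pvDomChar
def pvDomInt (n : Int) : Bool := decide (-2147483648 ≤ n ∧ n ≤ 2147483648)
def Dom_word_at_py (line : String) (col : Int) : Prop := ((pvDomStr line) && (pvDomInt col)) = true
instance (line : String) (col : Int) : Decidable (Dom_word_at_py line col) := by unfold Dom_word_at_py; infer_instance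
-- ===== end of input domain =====

-- B changes the decomposition: instead of A's two while-loops expanding left/right from the
-- cursor, B collects all maximal word-character runs in one forward pass and picks the unique
-- span whose inclusive range contains the clamped column. Same O(n) cost ("alternative").

-- ===== PORT A =====

-- the character test `c.isalnum() or c in "@_?"`, shared verbatim by A and B
def pvIsW (c : Char) : Bool := PySem.Chars.isalnum c || c == '@' || c == '_' || c == '?'

-- `while i > 0 and (line[i-1].isalnum() or line[i-1] in "@_?"): i -= 1`
def pvLeftA (cs : List Char) : Nat → Nat
  | 0 => 0
  | i + 1 => if pvIsW (cs.getD i ' ') then pvLeftA cs i else i + 1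

-- `while j < len(line) and (line[j].isalnum() or line[j] in "@_?"): j += 1`
def pvRightA (cs : List Char) (j : Nat) : Nat :=
  if h : j < cs.length then
    if pvIsW cs[j] then pvRightA cs (j + 1) else j
  else j
termination_by cs.length - j

def word_at_py (line : String) (col : Int) : Option String :=
  let cs := line.toList
  if cs.length = 0 then none
  else
    let col := if (cs.length : Int) ≤ col then (cs.length : Int) - 1 else col
    if col < 0 then none
    else
      let c := col.toNat
      let i := pvLeftA cs c
      let j := pvRightA cs c
      let w := PySem.List.slice cs (some (i : Int)) (some (j : Int))  -- line[i:j]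
      if w.isEmpty then none else some (String.mk w)

-- ===== PORT B =====

-- the body of B's `for idx, ch in enumerate(line)` loop, updating (spans, start)
def pvScanStep (st : List (Int × Int) × Option Int) (p : Int × Char) :
    List (Int × Int) × Option Int :=
  if pvIsW p.2 then
    match st.2 with
    | none => (st.1, some p.1)
    | some s => (st.1, some s)
  else
    match st.2 with
    | none => (st.1, none)
    | some s => (st.1 ++ [(s, p.1)], none)

def word_at_py_alt (line : String) (col : Int) : Option String :=
  let cs := line.toList
  if cs.length = 0 then none
  else
    let n : Int := cs.length
    let col := if n ≤ col then n - 1 else col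
    if col < 0 then none
    else
      let st := (PySem.List.enumerate cs 0).foldl pvScanStep ([], none)
      let spans := match st.2 with
        | some s => st.1 ++ [(s, n)]
        | none => st.1
      match spans.find? (fun p => decide (p.1 ≤ col ∧ col ≤ p.2)) with
      | some p => some (String.mk (PySem.List.slice cs (some p.1) (some p.2)))  -- line[s:e]
      | none => none

-- ===== PRECONDITION & SPEC =====
def Spec_word_at_py (line : String) (col : Int) (out : Option String) : Prop := out = word_at_py_alt line col
instance (line : String) (col : Int) (out : Option String) : Decidable (Spec_word_at_py line col out) := by unfold Spec_word_at_py; infer_instance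

-- ===== CLAIM (what is proved, stated in full; the proofs are below) =====
def Claim_equal_word_at_py : Prop := ∀ (line : String) (col : Int), Dom_word_at_py line col → Spec_word_at_py line col (word_at_py line col)

-- ===== LEMMAS AND PROOFS =====

-- word-character test at a position, with out-of-range positions non-word
def pvWd (cs : List Char) (k : Nat) : Bool := pvIsW (cs.getD k ' ')

-- (a,b) is a maximal run of word characters in cs
def pvRun (cs : List Char) (a b : Nat) : Prop :=
  a < b ∧ b ≤ cs.length ∧ (∀ k, a ≤ k → k < b → pvWd cs k = true) ∧
    (a = 0 ∨ pvWd cs (a - 1) = false) ∧ pvWd cs b = false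

theorem pvRun_unique {cs : List Char} {a b a' b' c : Nat}
    (h : pvRun cs a b) (h' : pvRun cs a' b')
    (hc : a ≤ c ∧ c ≤ b) (hc' : a' ≤ c ∧ c ≤ b') : a = a' ∧ b = b' := by
  obtain ⟨hab, hbn, hall, hleft, hr⟩ := h
  obtain ⟨hab', hbn', hall', hleft', hr'⟩ := h'
  have hstart : a = a' := by
    by_contra hne
    rcases Nat.lt_or_ge a a' with hlt | hge
    · -- a < a' : then a' ≤ c ≤ b so a ≤ a'-1 < b unless a' > b
      rcases Nat.lt_or_ge (a' - 1) b with hx | hx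
      · have hw := hall (a' - 1) (by omega) hx
        rcases hleft' with h0 | hnw
        · omega
        · simp [hw] at hnw
      · -- a' - 1 ≥ b, so c ≤ b ≤ a' - 1 < a' ≤ c, contradiction
        omega
    · rcases Nat.lt_or_ge a' a with hlt' | hge'
      · rcases Nat.lt_or_ge (a - 1) b' with hx | hx
        · have hw := hall' (a - 1) (by omega) hx
          rcases hleft with h0 | hnw
          · omega
          · simp [hw] at hnw
        · omega
      · omega
  subst hstart
  constructor
  · rfl
  · by_contra hne
    rcases Nat.lt_or_ge b b' with hlt | hge
    · have hw := hall' b (by omega) hlt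
      simp [hw] at hr
    · have hlt' : b' < b := by omega
      have hw := hall b' (by omega) hlt'
      simp [hw] at hr'

theorem pvFind?_unique {α : Type} {p : α} {l : List α} {pred : α → Bool}
    (hmem : p ∈ l) (hp : pred p = true) (huniq : ∀ q ∈ l, pred q = true → q = p) :
    l.find? pred = some p := by
  induction l with
  | nil => cases hmem
  | cons x xs ih =>
    by_cases hx : pred x = true
    · have hxe : x = p := huniq x (List.mem_cons_self) hx
      rw [List.find?_cons_of_pos hx, hxe]
    · have hxp : x ≠ p := fun he => hx (he ▸ hp)
      have hmem' : p ∈ xs := by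
        rcases List.mem_cons.mp hmem with h | h
        · exact absurd h.symm hxp
        · exact h
      rw [List.find?_cons_of_neg hx]
      exact ih hmem' (fun q hq hpq => huniq q (List.mem_cons_of_mem _ hq) hpq)

-- ----- A-side loop characterizations -----

theorem pvLeftA_spec (cs : List Char) (c : Nat) :
    pvLeftA cs c ≤ c ∧ (∀ k, pvLeftA cs c ≤ k → k < c → pvWd cs k = true) ∧
      (pvLeftA cs c = 0 ∨ pvWd cs (pvLeftA cs c - 1) = false) := by
  induction c with
  | zero => simp [pvLeftA]
  | succ i ih =>
    by_cases h : pvIsW (cs.getD i ' ') = true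
    · have hval : pvLeftA cs (i + 1) = pvLeftA cs i := by rw [pvLeftA, if_pos h]
      obtain ⟨h1, h2, h3⟩ := ih
      refine ⟨by omega, ?_, by rw [hval]; exact h3⟩
      intro k hk1 hk2
      rcases Nat.lt_or_ge k i with hlt | hge
      · exact h2 k (hval ▸ hk1) hlt
      · have : k = i := by omega
        subst this; exact h
    · have hval : pvLeftA cs (i + 1) = i + 1 := by rw [pvLeftA, if_neg h]
      rw [hval]
      exact ⟨le_refl _, fun k hk1 hk2 => by omega, Or.inr (by simpa [pvWd] using h)⟩

theorem pvRightA_spec (cs : List Char) (j : Nat) :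
    j ≤ pvRightA cs j ∧ pvRightA cs j ≤ max j cs.length ∧
      (∀ k, j ≤ k → k < pvRightA cs j → pvWd cs k = true) ∧
      pvWd cs (pvRightA cs j) = false := by
  induction j using pvRightA.induct (cs := cs) with
  | case1 j h hw ih =>
    have hval : pvRightA cs (j) = pvRightA cs (j + 1) := by
      rw [pvRightA, dif_pos h, if_pos hw]
    obtain ⟨h1, h2, h3, h4⟩ := ih
    rw [hval]
    refine ⟨by omega, by omega, ?_, h4⟩
    intro k hk1 hk2
    rcases Nat.lt_or_ge k (j + 1) with hlt | hge
    · have : k = j := by omega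
      subst this
      simpa [pvWd, List.getD_eq_getElem?_getD, List.getElem?_eq_getElem h] using hw
    · exact h3 k hge hk2
  | case2 j h hw =>
    have hval : pvRightA cs j = j := by rw [pvRightA, dif_pos h, if_neg hw]
    rw [hval]
    refine ⟨le_refl _, by omega, fun k hk1 hk2 => by omega, ?_⟩
    simpa [pvWd, List.getD_eq_getElem?_getD, List.getElem?_eq_getElem h] using hw
  | case3 j h =>
    have hval : pvRightA cs j = j := by rw [pvRightA, dif_neg h]
    rw [hval]
    refine ⟨le_refl _, by omega, fun k hk1 hk2 => by omega, ?_⟩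
    have : cs.getD j ' ' = ' ' := by
      simp [List.getD_eq_getElem?_getD, List.getElem?_eq_none (by omega : cs.length ≤ j)]
    rw [pvWd, this]
    decide

-- ----- B-side scan characterization -----

theorem pvWd_oob (cs : List Char) {k : Nat} (h : cs.length ≤ k) : pvWd cs k = false := by
  rw [pvWd, List.getD_eq_default _ _ h]
  decide

theorem pvWd_append_lt (cs : List Char) (x : Char) {k : Nat} (h : k < cs.length) :
    pvWd (cs ++ [x]) k = pvWd cs k := by
  simp [pvWd, List.getD_eq_getElem?_getD, List.getElem?_append_left h]

theorem pvWd_append_self (cs : List Char) (x : Char) :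
    pvWd (cs ++ [x]) cs.length = pvIsW x := by
  simp [pvWd, List.getD_eq_getElem?_getD]

theorem pvRun_append_lt (cs : List Char) (x : Char) {a b : Nat} (hb : b < cs.length) :
    pvRun (cs ++ [x]) a b ↔ pvRun cs a b := by
  unfold pvRun
  constructor
  · rintro ⟨h1, h2, h3, h4, h5⟩
    refine ⟨h1, by omega, ?_, ?_, ?_⟩
    · intro k hk1 hk2
      rw [← pvWd_append_lt cs x (by omega)]; exact h3 k hk1 hk2
    · rcases h4 with h0 | h4
      · exact Or.inl h0
      · exact Or.inr (by rw [← pvWd_append_lt cs x (by omega)]; exact h4)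
    · rw [← pvWd_append_lt cs x hb]; exact h5
  · rintro ⟨h1, h2, h3, h4, h5⟩
    refine ⟨h1, by simp; omega, ?_, ?_, ?_⟩
    · intro k hk1 hk2
      rw [pvWd_append_lt cs x (by omega)]; exact h3 k hk1 hk2
    · rcases h4 with h0 | h4
      · exact Or.inl h0
      · exact Or.inr (by rw [pvWd_append_lt cs x (by omega)]; exact h4)
    · rw [pvWd_append_lt cs x hb]; exact h5

def pvFold (cs : List Char) : List (Int × Int) × Option Int :=
  (PySem.List.enumerate cs 0).foldl pvScanStep ([], none)

theorem pvFold_append (cs : List Char) (x : Char) :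
    pvFold (cs ++ [x]) = pvScanStep (pvFold cs) ((cs.length : Int), x) := by
  unfold pvFold
  rw [PySem.List.enumerate_append, List.foldl_append]
  simp [PySem.List.enumerate_cons, PySem.List.enumerate_nil]

def pvInv (cs : List Char) : Prop :=
  (∀ p ∈ (pvFold cs).1, ∃ a b : Nat, p = ((a : Int), (b : Int)) ∧ pvRun cs a b ∧ b < cs.length) ∧
  (∀ a b : Nat, pvRun cs a b → b < cs.length → ((a : Int), (b : Int)) ∈ (pvFold cs).1) ∧
  (match (pvFold cs).2 with
    | none => cs.length = 0 ∨ pvWd cs (cs.length - 1) = false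
    | some s => ∃ a : Nat, s = (a : Int) ∧ a < cs.length ∧
        (∀ k, a ≤ k → k < cs.length → pvWd cs k = true) ∧
        (a = 0 ∨ pvWd cs (a - 1) = false))

theorem pvInv_holds (cs : List Char) : pvInv cs := by
  induction cs using List.reverseRecOn with
  | nil =>
    refine ⟨by simp [pvFold, PySem.List.enumerate_nil], ?_, Or.inl rfl⟩
    intro a b hr hb
    simp at hb
  | append_singleton cs x ih =>
    obtain ⟨ih1, ih2, ih3⟩ := ih
    have hlen : (cs ++ [x]).length = cs.length + 1 := by simp
    by_cases hx : pvIsW x = true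
    · cases hst : (pvFold cs).2 with
      | none =>
        rw [hst] at ih3
        have hF : pvFold (cs ++ [x]) = ((pvFold cs).1, some (cs.length : Int)) := by
          rw [pvFold_append, pvScanStep, hst]; simp [hx]
        refine ⟨?_, ?_, ?_⟩ <;> rw [hF]
        · intro p hp
          obtain ⟨a, b, rfl, hr, hb⟩ := ih1 p hp
          exact ⟨a, b, rfl, (pvRun_append_lt cs x hb).mpr hr, by omega⟩
        · intro a b hr hb'
          rw [hlen] at hb'
          rcases Nat.lt_or_ge b cs.length with hbn | hbn
          · exact ih2 a b ((pvRun_append_lt cs x hbn).mp hr) hbn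
          · exfalso
            have hbe : b = cs.length := by omega
            have h5 := hr.2.2.2.2
            rw [hbe, pvWd_append_self] at h5
            simp [hx] at h5
        · refine ⟨cs.length, rfl, by omega, ?_, ?_⟩
          · intro k hk1 hk2
            have : k = cs.length := by omega
            subst this
            rw [pvWd_append_self]; exact hx
          · rcases Nat.eq_zero_or_pos cs.length with hz | hpos
            · exact Or.inl hz
            · rcases ih3 with h0 | hnw
              · exact Or.inl h0
              · exact Or.inr (by rw [pvWd_append_lt cs x (by omega)]; exact hnw)
      | some s =>
        rw [hst] at ih3
        obtain ⟨a, rfl, ha, hall, hleft⟩ := ih3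
        have hF : pvFold (cs ++ [x]) = ((pvFold cs).1, some (a : Int)) := by
          rw [pvFold_append, pvScanStep, hst]; simp [hx]
        refine ⟨?_, ?_, ?_⟩ <;> rw [hF]
        · intro p hp
          obtain ⟨a', b, rfl, hr, hb⟩ := ih1 p hp
          exact ⟨a', b, rfl, (pvRun_append_lt cs x hb).mpr hr, by omega⟩
        · intro a' b hr hb'
          rw [hlen] at hb'
          rcases Nat.lt_or_ge b cs.length with hbn | hbn
          · exact ih2 a' b ((pvRun_append_lt cs x hbn).mp hr) hbn
          · exfalso
            have hbe : b = cs.length := by omega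
            have h5 := hr.2.2.2.2
            rw [hbe, pvWd_append_self] at h5
            simp [hx] at h5
        · refine ⟨a, rfl, by omega, ?_, ?_⟩
          · intro k hk1 hk2
            rcases Nat.lt_or_ge k cs.length with hkn | hkn
            · rw [pvWd_append_lt cs x hkn]; exact hall k hk1 hkn
            · have : k = cs.length := by omega
              subst this
              rw [pvWd_append_self]; exact hx
          · rcases hleft with h0 | hnw
            · exact Or.inl h0
            · refine Or.inr ?_
              rw [pvWd_append_lt cs x (by omega)]; exact hnw
    · cases hst : (pvFold cs).2 with
      | none =>
        rw [hst] at ih3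
        have hF : pvFold (cs ++ [x]) = ((pvFold cs).1, none) := by
          rw [pvFold_append, pvScanStep, hst]; simp [hx]
        refine ⟨?_, ?_, ?_⟩ <;> rw [hF]
        · intro p hp
          obtain ⟨a, b, rfl, hr, hb⟩ := ih1 p hp
          exact ⟨a, b, rfl, (pvRun_append_lt cs x hb).mpr hr, by omega⟩
        · intro a b hr hb'
          rw [hlen] at hb'
          rcases Nat.lt_or_ge b cs.length with hbn | hbn
          · exact ih2 a b ((pvRun_append_lt cs x hbn).mp hr) hbn
          · exfalso
            have hbe : b = cs.length := by omega
            obtain ⟨h1, h2, h3, h4, h5⟩ := hr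
            rcases ih3 with h0 | hnw
            · omega
            · have hw := h3 (cs.length - 1) (by omega) (by omega)
              rw [pvWd_append_lt cs x (by omega)] at hw
              simp [hw] at hnw
        · refine Or.inr ?_
          rw [hlen]
          simpa [pvWd_append_self] using (by simpa using hx : pvIsW x = false)
      | some s =>
        rw [hst] at ih3
        obtain ⟨a, rfl, ha, hall, hleft⟩ := ih3
        have hF : pvFold (cs ++ [x]) = ((pvFold cs).1 ++ [((a : Int), (cs.length : Int))], none) := by
          rw [pvFold_append, pvScanStep, hst]; simp [hx]
        have hrun_new : pvRun (cs ++ [x]) a cs.length := by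
          refine ⟨ha, by omega, ?_, ?_, ?_⟩
          · intro k hk1 hk2
            rw [pvWd_append_lt cs x hk2]; exact hall k hk1 hk2
          · rcases hleft with h0 | hnw
            · exact Or.inl h0
            · exact Or.inr (by rw [pvWd_append_lt cs x (by omega)]; exact hnw)
          · rw [pvWd_append_self]; simpa using hx
        refine ⟨?_, ?_, ?_⟩ <;> rw [hF]
        · intro p hp
          rcases List.mem_append.mp hp with hp | hp
          · obtain ⟨a', b, rfl, hr, hb⟩ := ih1 p hp
            exact ⟨a', b, rfl, (pvRun_append_lt cs x hb).mpr hr, by omega⟩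
          · refine ⟨a, cs.length, List.mem_singleton.mp hp, hrun_new, by omega⟩
        · intro a' b hr hb'
          rw [hlen] at hb'
          rcases Nat.lt_or_ge b cs.length with hbn | hbn
          · exact List.mem_append_left _ (ih2 a' b ((pvRun_append_lt cs x hbn).mp hr) hbn)
          · have hbe : b = cs.length := by omega
            subst hbe
            have := pvRun_unique hr hrun_new ⟨le_of_lt hr.1, le_refl _⟩ ⟨le_of_lt hrun_new.1, le_refl _⟩
            obtain ⟨hae, -⟩ := this
            subst hae
            exact List.mem_append_right _ (List.mem_singleton.mpr rfl)
        · refine Or.inr ?_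
          rw [hlen]
          simpa [pvWd_append_self] using (by simpa using hx : pvIsW x = false)

-- the final spans list B computes, and its soundness/completeness
def pvSpans (cs : List Char) : List (Int × Int) :=
  match (pvFold cs).2 with
  | some s => (pvFold cs).1 ++ [(s, (cs.length : Int))]
  | none => (pvFold cs).1

theorem pvSpans_sound (cs : List Char) :
    ∀ p ∈ pvSpans cs, ∃ a b : Nat, p = ((a : Int), (b : Int)) ∧ pvRun cs a b := by
  obtain ⟨ih1, ih2, ih3⟩ := pvInv_holds cs
  intro p hp
  unfold pvSpans at hp
  cases hst : (pvFold cs).2 with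
  | none =>
    rw [hst] at hp
    obtain ⟨a, b, rfl, hr, -⟩ := ih1 p hp
    exact ⟨a, b, rfl, hr⟩
  | some s =>
    rw [hst] at hp ih3
    rcases List.mem_append.mp hp with hp | hp
    · obtain ⟨a, b, rfl, hr, -⟩ := ih1 p hp
      exact ⟨a, b, rfl, hr⟩
    · obtain ⟨a, rfl, ha, hall, hleft⟩ := ih3
      refine ⟨a, cs.length, List.mem_singleton.mp hp, ha, le_refl _, hall, hleft, ?_⟩
      exact pvWd_oob cs (le_refl _)

theorem pvSpans_complete (cs : List Char) {a b : Nat} (hr : pvRun cs a b) :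
    ((a : Int), (b : Int)) ∈ pvSpans cs := by
  obtain ⟨ih1, ih2, ih3⟩ := pvInv_holds cs
  unfold pvSpans
  rcases Nat.lt_or_ge b cs.length with hbn | hbn
  · cases hst : (pvFold cs).2 with
    | none => exact ih2 a b hr hbn
    | some s => exact List.mem_append_left _ (ih2 a b hr hbn)
  · have hble := hr.2.1
    have hbe : b = cs.length := by omega
    subst hbe
    obtain ⟨h1, h2, h3, h4, h5⟩ := hr
    cases hst : (pvFold cs).2 with
    | none =>
      exfalso
      rw [hst] at ih3
      rcases ih3 with h0 | hnw
      · omega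
      · have hw := h3 (cs.length - 1) (by omega) (by omega)
        simp [hw] at hnw
    | some s =>
      rw [hst] at ih3
      obtain ⟨a', rfl, ha', hall', hleft'⟩ := ih3
      have hrun' : pvRun cs a' cs.length :=
        ⟨ha', le_refl _, hall', hleft', pvWd_oob cs (le_refl _)⟩
      have := pvRun_unique ⟨h1, h2, h3, h4, h5⟩ hrun' ⟨le_of_lt h1, le_refl _⟩ ⟨le_of_lt ha', le_refl _⟩
      obtain ⟨hae, -⟩ := this
      rw [hae]
      exact List.mem_append_right _ (List.mem_singleton.mpr rfl)

-- ----- the main bridge: A's expand-from-cursor result equals B's span lookup -----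

theorem pvGetElem_wd (cs : List Char) {c : Nat} (hc : c < cs.length) :
    pvIsW cs[c] = pvWd cs c := by
  simp [pvWd, List.getD_eq_getElem?_getD, List.getElem?_eq_getElem hc]

theorem pvMain (cs : List Char) (c : Nat) (hc : c < cs.length) :
    (if (PySem.List.slice cs (some ((pvLeftA cs c : Nat) : Int)) (some ((pvRightA cs c : Nat) : Int))).isEmpty then none
     else some (String.mk (PySem.List.slice cs (some ((pvLeftA cs c : Nat) : Int)) (some ((pvRightA cs c : Nat) : Int))))) =
    (match (pvSpans cs).find? (fun p => decide (p.1 ≤ (c : Int) ∧ (c : Int) ≤ p.2)) with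
     | some p => some (String.mk (PySem.List.slice cs (some p.1) (some p.2)))
     | none => none) := by
  obtain ⟨hi_le, hi_all, hi_left⟩ := pvLeftA_spec cs c
  obtain ⟨hj_ge, hj_le, hj_all, hj_nw⟩ := pvRightA_spec cs c
  have hj_le' : pvRightA cs c ≤ cs.length := by omega
  by_cases hwc : pvWd cs c = true
  · -- the cursor sits on a word character: A grows the run [leftA, rightA)
    have hij : c < pvRightA cs c := by
      rcases Nat.lt_or_ge c (pvRightA cs c) with h | h
      · exact h
      · have he : pvRightA cs c = c := by omega
        rw [he, hwc] at hj_nw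
        cases hj_nw
    have hrun : pvRun cs (pvLeftA cs c) (pvRightA cs c) := by
      refine ⟨by omega, hj_le', ?_, hi_left, hj_nw⟩
      intro k hk1 hk2
      rcases Nat.lt_or_ge k c with hk | hk
      · exact hi_all k hk1 hk
      · exact hj_all k hk hk2
    have hfind : (pvSpans cs).find? (fun p => decide (p.1 ≤ (c : Int) ∧ (c : Int) ≤ p.2)) =
        some ((pvLeftA cs c : Int), (pvRightA cs c : Int)) := by
      refine pvFind?_unique (pvSpans_complete cs hrun) ?_ ?_
      · simp only [decide_eq_true_eq]
        exact ⟨by exact_mod_cast hi_le, by exact_mod_cast le_of_lt hij⟩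
      · intro q hq hpred
        obtain ⟨a, b, rfl, hrq⟩ := pvSpans_sound cs q hq
        simp only [decide_eq_true_eq] at hpred
        have hac : a ≤ c := by exact_mod_cast hpred.1
        have hcb : c ≤ b := by exact_mod_cast hpred.2
        obtain ⟨h1, h2⟩ := pvRun_unique hrq hrun ⟨hac, hcb⟩ ⟨hi_le, le_of_lt hij⟩
        rw [h1, h2]
    rw [hfind]
    have hne : (PySem.List.slice cs (some ((pvLeftA cs c : Nat) : Int)) (some ((pvRightA cs c : Nat) : Int))).isEmpty = false := by
      rw [PySem.List.slice_natCast, List.isEmpty_eq_false_iff, ← List.length_pos_iff]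
      rw [List.length_take, List.length_drop]
      omega
    rw [hne]
    simp
  · have hwc' : pvWd cs c = false := by simpa using hwc
    have hj : pvRightA cs c = c := by
      rw [pvRightA, dif_pos hc, if_neg (by rw [pvGetElem_wd cs hc, hwc']; exact Bool.false_ne_true)]
    by_cases hp : 0 < c ∧ pvWd cs (c - 1) = true
    · -- the cursor sits just after a word: A selects the run ending at c
      have hi_lt : pvLeftA cs c < c := by
        rcases hi_left with h0 | hnw
        · omega
        · rcases Nat.lt_or_ge (pvLeftA cs c) c with h | h
          · exact h
          · have he : pvLeftA cs c = c := by omega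
            rw [he, hp.2] at hnw
            cases hnw
      have hrun : pvRun cs (pvLeftA cs c) c := ⟨hi_lt, le_of_lt hc, hi_all, hi_left, hwc'⟩
      have hfind : (pvSpans cs).find? (fun p => decide (p.1 ≤ (c : Int) ∧ (c : Int) ≤ p.2)) =
          some ((pvLeftA cs c : Int), (c : Int)) := by
        refine pvFind?_unique (pvSpans_complete cs hrun) ?_ ?_
        · simp only [decide_eq_true_eq]
          exact ⟨by exact_mod_cast hi_le, le_refl _⟩
        · intro q hq hpred
          obtain ⟨a, b, rfl, hrq⟩ := pvSpans_sound cs q hq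
          simp only [decide_eq_true_eq] at hpred
          have hac : a ≤ c := by exact_mod_cast hpred.1
          have hcb : c ≤ b := by exact_mod_cast hpred.2
          obtain ⟨h1, h2⟩ := pvRun_unique hrq hrun ⟨hac, hcb⟩ ⟨hi_le, le_refl _⟩
          rw [h1, h2]
      rw [hfind, hj]
      have hne : (PySem.List.slice cs (some ((pvLeftA cs c : Nat) : Int)) (some ((c : Nat) : Int))).isEmpty = false := by
        rw [PySem.List.slice_natCast, List.isEmpty_eq_false_iff, ← List.length_pos_iff]
        rw [List.length_take, List.length_drop]
        omega
      rw [hne]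
      simp
    · -- no word character touches the cursor: A and B both yield None
      have hi : pvLeftA cs c = c := by
        cases c with
        | zero => rfl
        | succ m =>
          have hm : pvWd cs m = false := by
            rcases Bool.eq_false_or_eq_true (pvWd cs m) with h | h
            · exact absurd ⟨Nat.succ_pos m, h⟩ hp
            · exact h
          rw [pvLeftA, if_neg (by rw [show pvIsW (cs.getD m ' ') = pvWd cs m from rfl, hm]; exact Bool.false_ne_true)]
      have hfind : (pvSpans cs).find? (fun p => decide (p.1 ≤ (c : Int) ∧ (c : Int) ≤ p.2)) = none := by
        rw [List.find?_eq_none]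
        intro q hq
        obtain ⟨a, b, rfl, hrq⟩ := pvSpans_sound cs q hq
        simp only [decide_eq_true_eq, not_and]
        intro hac hcb
        exfalso
        have hac' : a ≤ c := by exact_mod_cast hac
        have hcb' : c ≤ b := by exact_mod_cast hcb
        obtain ⟨h1, h2, h3, h4, h5⟩ := hrq
        rcases Nat.lt_or_ge c b with hlt | hge
        · have := h3 c hac' hlt
          rw [this] at hwc'
          cases hwc'
        · have hcbe : c = b := by omega
          have hc0 : 0 < c := by omega
          have := h3 (c - 1) (by omega) (by omega)
          exact absurd ⟨hc0, this⟩ hp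
      rw [hfind, hi, hj]
      have he : (PySem.List.slice cs (some ((c : Nat) : Int)) (some ((c : Nat) : Int))).isEmpty = true := by
        rw [PySem.List.slice_natCast]
        simp
      rw [he]
      simp

-- ===== VERDICT (by name: the statement is the Claim_ definition above) =====
theorem word_at_py_spec : Claim_equal_word_at_py := by
  intro line col _
  show word_at_py line col = word_at_py_alt line col
  simp only [word_at_py, word_at_py_alt]
  by_cases hz : line.toList.length = 0
  · rw [if_pos hz, if_pos hz]
  · rw [if_neg hz, if_neg hz]
    set cs := line.toList with hcs
    set col' : Int := if (cs.length : Int) ≤ col then (cs.length : Int) - 1 else col with hcol'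
    by_cases hneg : col' < 0
    · rw [if_pos hneg, if_pos hneg]
    · rw [if_neg hneg, if_neg hneg]
      have h0 : 0 ≤ col' := le_of_not_gt hneg
      have hcn : col'.toNat < cs.length := by
        rcases le_or_gt (cs.length : Int) col with h | h
        · rw [hcol', if_pos h]; omega
        · rw [hcol', if_neg (not_le.mpr h)]; omega
      set c : Nat := col'.toNat with hc
      have hc2 : col' = (c : Int) := (Int.toNat_of_nonneg h0).symm
      rw [hc2]
      exact pvMain cs c hcn
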